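-- pv_equiv track=rewrite | github.com/SuhyungK/Algorithm | PGM/Lv2/할인행사.py | solution
-- ===== SOURCE A (Python) =====
-- def solution(want, number, discount):
-- 	# 키 : 원하는 품목, 값 : 인덱스
--     stuff = {want[idx]: idx for idx in range(len(want))}
--     answer = 0
--
--     # 10일 간 할인하는 품목들에 대해 연산
--     # 품목이 stuff 키 값으로 존재한다면 인덱스를 구해 discount_stuff 배열에 추가
--     discount_stuff = [0] * len(want)
--     for i in range(10):
--         idx = stuff.get(discount[i])
--         if idx != None:
--             discount_stuff[idx] += 1
--
--     for i in range(10, len(discount)):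
--     	# 원하는 품목과 할인하는 품목의 개수가 일치하는 경우
--         if discount_stuff == number:
--             answer += 1
--
--         # 다음날 빠져야 되는 품목과 다음날 추가되는 품목이 같은 거라면
--         # 다음에 이행되는 연산을 수행할 필요가 없으므로 넘어감
--         if discount[i] == discount[i-10]:
--             continue
--
--         # 다음날 추가되어야 할 품목을 더해주고
--         next_idx = stuff.get(discount[i])
--         if next_idx != None:
--             discount_stuff[next_idx] += 1
--
--         # 10일 전의 품목은 제외하기
--         pre_idx = stuff.get(discount[i-10])
--         if pre_idx != None:
--             discount_stuff[pre_idx] -= 1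
--
--     if discount_stuff == number:
--         answer += 1
--     return answer
-- ===== SOURCE B (Python) =====
-- def solution(want, number, discount):
--     stuff = {want[i]: i for i in range(len(want))}
--     answer = 0
--     start = 0
--     while True:
--         counts = [0] * len(want)
--         for k in range(10):
--             idx = stuff.get(discount[start + k])
--             if idx is not None:
--                 counts[idx] += 1
--         if counts == number:
--             answer += 1
--         if start + 10 >= len(discount):
--             return answer
--         start += 1
-- ===== Notes on version B (the rewrite author's own statement) =====
-- stated objective: alternative
-- what changed: Replaces A's incremental sliding-window bookkeeping (seed counts from the first 10 items, then per day add the entering item, remove the leaving one, skipping when they coincide) by a do-while over window starts that rescans the 10 items of each window into a fresh zero count list.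
import Mathlib
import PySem

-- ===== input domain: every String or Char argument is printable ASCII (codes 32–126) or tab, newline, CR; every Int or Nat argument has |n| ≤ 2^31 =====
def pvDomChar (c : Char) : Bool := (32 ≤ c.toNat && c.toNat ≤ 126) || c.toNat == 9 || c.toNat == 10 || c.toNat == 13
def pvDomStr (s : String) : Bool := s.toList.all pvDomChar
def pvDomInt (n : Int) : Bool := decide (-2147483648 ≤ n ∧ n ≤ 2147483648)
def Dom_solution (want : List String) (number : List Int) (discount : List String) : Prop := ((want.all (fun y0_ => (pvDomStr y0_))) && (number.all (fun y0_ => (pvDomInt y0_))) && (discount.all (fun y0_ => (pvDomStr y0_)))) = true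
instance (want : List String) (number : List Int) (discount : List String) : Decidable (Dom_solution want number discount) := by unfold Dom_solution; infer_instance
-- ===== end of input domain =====

-- B replaces A's incremental sliding-window add/remove bookkeeping by a do-while over
-- window starts that re-scans each 10-item window from a fresh zero count list
-- (an alternative decomposition, not faster).

-- ===== PORT A =====
-- shared by both ports: 'idx = stuff.get(item); if idx != None: counts[idx] += d'
def pvBump (stuff : PySem.Dict String Int) (cs : List Int) (item : String) (d : Int) : List Int :=
  match stuff.get? item with
  | some idx => cs.modify idx.toNat (· + d)
  | none => cs

-- 'stuff = {want[idx]: idx for idx in range(len(want))}'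
def pvStuff (want : List String) : PySem.Dict String Int :=
  (PySem.List.pyRange 0 want.length 1).foldl
    (fun d idx =>
      match PySem.List.pyGet? want idx with
      | some w => d.insert w idx
      | none => d)
    PySem.Dict.empty

def solution (want : List String) (number : List Int) (discount : List String) : Int :=
  let stuff := pvStuff want
  let ds :=
    (PySem.List.pyRange 0 10 1).foldl
      (fun ds i =>
        match PySem.List.pyGet? discount i with
        | some item => pvBump stuff ds item 1
        | none => ds)
      (List.replicate want.length 0)
  let st :=
    (PySem.List.pyRange 10 (discount.length : Int) 1).foldl
      (fun (st : Int × List Int) i =>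
        let answer := if st.2 = number then st.1 + 1 else st.1
        match PySem.List.pyGet? discount i, PySem.List.pyGet? discount (i - 10) with
        | some cur, some pre =>
            if cur = pre then (answer, st.2)
            else (answer, pvBump stuff (pvBump stuff st.2 cur 1) pre (-1))
        | _, _ => (answer, st.2))
      ((0 : Int), ds)
  if st.2 = number then st.1 + 1 else st.1

-- ===== PORT B =====
-- B's do-while over window starts: rescan the 10 items of each window from scratch
def solGo (stuff : PySem.Dict String Int) (n : Nat) (number : List Int)
    (discount : List String) (answer : Int) (start : Nat) : Int :=
  let counts :=
    (PySem.List.pyRange 0 10 1).foldl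
      (fun cs k =>
        match PySem.List.pyGet? discount ((start : Int) + k) with
        | some item => pvBump stuff cs item 1
        | none => cs)
      (List.replicate n 0)
  let answer := if counts = number then answer + 1 else answer
  if discount.length ≤ start + 10 then answer
  else solGo stuff n number discount answer (start + 1)
termination_by discount.length - start
decreasing_by omega

def solution_alt (want : List String) (number : List Int) (discount : List String) : Int :=
  solGo (pvStuff want) want.length number discount 0 0

-- ===== PRECONDITION & SPEC =====
-- A indexes discount[0..9] up front: it raises IndexError when len(discount) < 10.
def Pre_solution (want : List String) (number : List Int) (discount : List String) : Prop :=
  10 ≤ discount.length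
instance (want : List String) (number : List Int) (discount : List String) : Decidable (Pre_solution want number discount) := by unfold Pre_solution; infer_instance

def pvWitness_solution : List String × List Int × List String :=
  (["a", "b"], [3, 2],
   ["a", "b", "a", "b", "a", "b", "c", "a", "b", "a", "a", "b"])

def Spec_solution (want : List String) (number : List Int) (discount : List String) (out : Int) : Prop := out = solution_alt want number discount
instance (want : List String) (number : List Int) (discount : List String) (out : Int) : Decidable (Spec_solution want number discount out) := by unfold Spec_solution; infer_instance

-- ===== CLAIM (what is proved, stated in full; the proofs are below) =====
def Claim_equal_solution : Prop := ∀ (want : List String) (number : List Int) (discount : List String), Dom_solution want number discount → Pre_solution want number discount → Spec_solution want number discount (solution want number discount)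


-- ===== LEMMAS AND PROOFS =====

-- window count: what B computes for one window
def pvWc (stuff : PySem.Dict String Int) (n : Nat) (w : List String) : List Int :=
  w.foldl (fun cs item => pvBump stuff cs item 1) (List.replicate n 0)

-- bumps commute
lemma pvBump_comm (stuff : PySem.Dict String Int) (cs : List Int) (x y : String) (a b : Int) :
    pvBump stuff (pvBump stuff cs x a) y b = pvBump stuff (pvBump stuff cs y b) x a := by
  unfold pvBump
  cases hx : stuff.get? x with
  | none => cases stuff.get? y <;> simp
  | some i =>
    cases hy : stuff.get? y with
    | none => simp
    | some j =>
      dsimp only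
      by_cases hij : i.toNat = j.toNat
      · rw [hij, List.modify_modify_eq, List.modify_modify_eq]
        congr 1; funext v; dsimp only [Function.comp]; ring
      · rw [List.modify_modify_ne _ _ _ hij]

-- +1 then -1 at the same item cancels
lemma pvBump_cancel (stuff : PySem.Dict String Int) (cs : List Int) (x : String) :
    pvBump stuff (pvBump stuff cs x 1) x (-1) = cs := by
  unfold pvBump
  cases hx : stuff.get? x with
  | none => rfl
  | some i =>
    dsimp only
    rw [List.modify_modify_eq]
    have : ((· + (-1 : Int)) ∘ (· + 1)) = id := by funext v; simp
    rw [this, List.modify_id]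

-- a bump on the seed can be pulled out of the window fold
lemma pvWc_fold_out (stuff : PySem.Dict String Int) (w : List String) (x : String) (d : Int) :
    ∀ cs : List Int,
      w.foldl (fun cs item => pvBump stuff cs item 1) (pvBump stuff cs x d)
        = pvBump stuff (w.foldl (fun cs item => pvBump stuff cs item 1) cs) x d := by
  induction w with
  | nil => intro cs; rfl
  | cons y w ih =>
    intro cs
    simp only [List.foldl_cons]
    rw [pvBump_comm, ih]

lemma pvWc_cons (stuff : PySem.Dict String Int) (n : Nat) (x : String) (w : List String) :
    pvWc stuff n (x :: w) = pvBump stuff (pvWc stuff n w) x 1 := by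
  unfold pvWc
  simp only [List.foldl_cons]
  rw [pvWc_fold_out]

lemma pvWc_concat (stuff : PySem.Dict String Int) (n : Nat) (w : List String) (x : String) :
    pvWc stuff n (w ++ [x]) = pvBump stuff (pvWc stuff n w) x 1 := by
  unfold pvWc
  rw [List.foldl_concat]

-- sliding the window by one step
lemma pvWc_slide (stuff : PySem.Dict String Int) (n : Nat) (p c : String) (w : List String) :
    pvBump stuff (pvBump stuff (pvWc stuff n (p :: w)) c 1) p (-1)
      = pvWc stuff n (w ++ [c]) := by
  rw [pvWc_cons, pvWc_concat, pvBump_comm stuff _ p c, pvBump_cancel]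

lemma pvWc_slide_eq (stuff : PySem.Dict String Int) (n : Nat) (p : String) (w : List String) :
    pvWc stuff n (p :: w) = pvWc stuff n (w ++ [p]) := by
  rw [pvWc_cons, pvWc_concat]

-- A's seed loop computes the count of the first window
lemma seed_loop (stuff : PySem.Dict String Int) (discount : List String)
    (h10 : 10 ≤ discount.length) :
    ∀ (k j : Nat), j + k = 10 → ∀ ds : List Int,
      (PySem.List.pyRange (j : Int) 10 1).foldl
        (fun ds i =>
          match PySem.List.pyGet? discount i with
          | some item => pvBump stuff ds item 1
          | none => ds) ds
        = ((discount.drop j).take k).foldl (fun cs item => pvBump stuff cs item 1) ds := by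
  intro k
  induction k with
  | zero =>
    intro j hj ds
    rw [PySem.List.pyRange_one_eq_nil (by omega)]
    simp
  | succ k ih =>
    intro j hj ds
    rw [PySem.List.pyRange_one_cons (by omega : (j : Int) < 10)]
    have hjl : j < discount.length := by omega
    rw [List.drop_eq_getElem_cons hjl]
    simp only [List.foldl_cons, List.take_succ_cons]
    rw [PySem.List.pyGet?_natCast, List.getElem?_eq_getElem hjl]
    have : (j : Int) + 1 = ((j + 1 : Nat) : Int) := by push_cast; ring
    rw [this, ih (j + 1) (by omega)]

-- B's inner scan of the window at 'start' computes that window's count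
lemma window_scan (stuff : PySem.Dict String Int) (discount : List String)
    (start : Nat) (hs : start + 10 ≤ discount.length) :
    ∀ (m j : Nat), j + m = 10 → ∀ cs : List Int,
      (PySem.List.pyRange (j : Int) 10 1).foldl
        (fun cs k =>
          match PySem.List.pyGet? discount ((start : Int) + k) with
          | some item => pvBump stuff cs item 1
          | none => cs) cs
        = ((discount.drop (start + j)).take m).foldl
            (fun cs item => pvBump stuff cs item 1) cs := by
  intro m
  induction m with
  | zero =>
    intro j hj cs
    rw [PySem.List.pyRange_one_eq_nil (by omega)]
    simp
  | succ m ih =>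
    intro j hj cs
    rw [PySem.List.pyRange_one_cons (by omega : (j : Int) < 10)]
    have hjl : start + j < discount.length := by omega
    rw [List.drop_eq_getElem_cons hjl]
    simp only [List.foldl_cons, List.take_succ_cons]
    rw [show (start : Int) + (j : Int) = ((start + j : Nat) : Int) from by push_cast; ring,
      PySem.List.pyGet?_natCast, List.getElem?_eq_getElem hjl]
    rw [show (j : Int) + 1 = ((j + 1 : Nat) : Int) from by push_cast; ring,
      ih (j + 1) (by omega)]
    rfl

-- B's counts for the window at 'start'
lemma counts_eval (stuff : PySem.Dict String Int) (n : Nat) (discount : List String)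
    (start : Nat) (hs : start + 10 ≤ discount.length) :
    (PySem.List.pyRange 0 10 1).foldl
      (fun cs k =>
        match PySem.List.pyGet? discount ((start : Int) + k) with
        | some item => pvBump stuff cs item 1
        | none => cs)
      (List.replicate n 0)
      = pvWc stuff n ((discount.drop start).take 10) := by
  have := window_scan stuff discount start hs 10 0 rfl (List.replicate n 0)
  simpa using this

-- the main loop correspondence: A's remaining loop + final check = B's remaining windows
lemma main_loop (stuff : PySem.Dict String Int) (n : Nat) (number : List Int)
    (discount : List String) :
    ∀ (k i : Nat), i + k = discount.length → 10 ≤ i →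
      ∀ (acc : Int) (cs : List Int), cs = pvWc stuff n ((discount.drop (i - 10)).take 10) →
      (let st :=
        (PySem.List.pyRange (i : Int) (discount.length : Int) 1).foldl
          (fun (st : Int × List Int) i =>
            let answer := if st.2 = number then st.1 + 1 else st.1
            match PySem.List.pyGet? discount i, PySem.List.pyGet? discount (i - 10) with
            | some cur, some pre =>
                if cur = pre then (answer, st.2)
                else (answer, pvBump stuff (pvBump stuff st.2 cur 1) pre (-1))
            | _, _ => (answer, st.2))
          (acc, cs)
       if st.2 = number then st.1 + 1 else st.1)
      = solGo stuff n number discount acc (i - 10) := by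
  intro k
  induction k with
  | zero =>
    intro i hik h10i acc cs hcs
    rw [PySem.List.pyRange_one_eq_nil (by omega : (discount.length : Int) ≤ (i : Int))]
    rw [solGo, counts_eval stuff n discount (i - 10) (by omega)]
    rw [if_pos (by omega : discount.length ≤ i - 10 + 10)]
    rw [hcs]
    simp only [List.foldl_nil]
  | succ k ih =>
    intro i hik h10i acc cs hcs
    have hiL : i < discount.length := by
      omega
    have hi10 : i - 10 < discount.length := by omega
    rw [PySem.List.pyRange_one_cons (by omega : (i : Int) < (discount.length : Int))]
    rw [show ((i : Int) + 1) = ((i + 1 : Nat) : Int) from by omega]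
    simp only [List.foldl_cons]
    have hcur : PySem.List.pyGet? discount (i : Int) = some (discount[i]'hiL) := by
      rw [PySem.List.pyGet?_natCast, List.getElem?_eq_getElem hiL]
    have hpre : PySem.List.pyGet? discount ((i : Int) - 10)
        = some (discount[i - 10]'hi10) := by
      rw [show (i : Int) - 10 = ((i - 10 : Nat) : Int) from by omega,
        PySem.List.pyGet?_natCast, List.getElem?_eq_getElem hi10]
    rw [hcur, hpre]
    rw [solGo, counts_eval stuff n discount (i - 10) (by omega)]
    rw [if_neg (by omega : ¬ discount.length ≤ i - 10 + 10)]
    dsimp only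
    have hwin : (discount.drop (i - 10)).take 10
        = discount[i - 10]'hi10 :: (discount.drop (i - 10 + 1)).take 9 := by
      rw [List.drop_eq_getElem_cons hi10]
      show List.take (9 + 1) _ = _
      rw [List.take_succ_cons]
    have hwin2 : (discount.drop (i - 10 + 1)).take 10
        = (discount.drop (i - 10 + 1)).take 9 ++ [discount[i]'hiL] := by
      show List.take (9 + 1) _ = _
      rw [List.take_add_one]
      congr 1
      rw [List.getElem?_drop, show i - 10 + 1 + 9 = i from by omega,
        List.getElem?_eq_getElem hiL]
      rfl
    have hnext : i + 1 - 10 = i - 10 + 1 := by omega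
    rw [hcs, hwin]
    by_cases hcc : discount[i]'hiL = discount[i - 10]'hi10
    · simp only [if_pos hcc]
      rw [← hnext,
        ih (i + 1) (by omega) (by omega) _ _
          (by rw [hnext, hwin2, ← hcc, pvWc_slide_eq, hcc])]
    · simp only [if_neg hcc]
      rw [← hnext,
        ih (i + 1) (by omega) (by omega) _ _
          (by rw [hnext, hwin2, ← pvWc_slide])]

theorem solution_eq (want : List String) (number : List Int) (discount : List String)
    (h10 : 10 ≤ discount.length) :
    solution want number discount = solution_alt want number discount := by
  unfold solution solution_alt
  have hseed := seed_loop (pvStuff want) discount h10 10 0 rfl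
    (List.replicate want.length 0)
  simp only [Nat.cast_zero, List.drop_zero] at hseed
  simp only []
  rw [hseed]
  have := main_loop (pvStuff want) want.length number discount
    (discount.length - 10) 10 (by omega) (by omega) 0
    ((discount.take 10).foldl (fun cs item => pvBump (pvStuff want) cs item 1)
      (List.replicate want.length 0))
    (by simp only [show (10 : Nat) - 10 = 0 from rfl, List.drop_zero]; rfl)
  simp only [show (10 : Nat) - 10 = 0 from rfl] at this
  exact this

-- ===== VERDICT (by name: the statement is the Claim_ definition above) =====
theorem solution_spec : Claim_equal_solution := by
  intro want number discount _ hpre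
  unfold Spec_solution
  exact solution_eq want number discount hpre
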